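-- pv_equiv track=rewrite | github.com/K123AsJ0k1/StoryApp | text.py | check_text_requirements
-- ===== SOURCE A (Python) =====
-- def check_text_requirements(text):
--     text_lenght = len(text)
--
--     if text_lenght == 0:
--        return False
--
--     if text_lenght <= 100:
--        return True
--
--     if text.find("\r\n") == -1:
--        return False
--
--     line_size = 0
--     for letter in text:
--         if letter == "\r":
--             if line_size > 100:
--                 return False
--             line_size = 0
--             continue
--         if letter == "\n":
--             continue
--         line_size = line_size + 1
--         if line_size > 100:
--             return False
--
--     return True
-- ===== SOURCE B (Python) =====
-- def check_text_requirements(text):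
--     if len(text) == 0:
--         return False
--     if len(text) <= 100:
--         return True
--     if "\r\n" not in text:
--         return False
--     stripped = ''.join(c for c in text if c != '\n')
--     return all(len(seg) <= 100 for seg in stripped.split('\r'))
-- ===== Notes on version B (the rewrite author's own statement) =====
-- stated objective: idiomatic
-- what changed: Replaced the character-by-character line_size state machine (with early returns and a dead per-CR length check) by filtering out the LF characters, splitting on CR and checking that every segment has length <= 100; the three early guards are kept.
import Mathlib
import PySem

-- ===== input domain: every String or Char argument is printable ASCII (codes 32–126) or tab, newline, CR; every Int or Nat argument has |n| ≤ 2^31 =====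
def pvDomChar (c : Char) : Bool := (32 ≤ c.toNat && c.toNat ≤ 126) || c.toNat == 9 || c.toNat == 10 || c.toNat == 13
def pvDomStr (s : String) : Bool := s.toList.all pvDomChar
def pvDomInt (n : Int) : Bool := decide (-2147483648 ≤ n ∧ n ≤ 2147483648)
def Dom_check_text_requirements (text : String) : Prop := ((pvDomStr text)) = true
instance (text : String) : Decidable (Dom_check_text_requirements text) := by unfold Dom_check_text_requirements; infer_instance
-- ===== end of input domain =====

-- B replaces A's char-by-char line-length state machine by a filter-out-LF-then-split-on-CR
-- check (more idiomatic; same cost).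


-- ===== PORT A =====
-- the for-loop over the characters, carrying line_size; early 'return False' = result false
def pvALoop : List Char → Int → Bool
  | [], _ => true
  | c :: rest, lineSize =>
    if c = '\r' then
      if lineSize > 100 then false else pvALoop rest 0
    else if c = '\n' then pvALoop rest lineSize
    else if lineSize + 1 > 100 then false else pvALoop rest (lineSize + 1)

def check_text_requirements (text : String) : Bool :=
  let textLenght : Int := PySem.Str.len text
  if textLenght = 0 then false
  else if textLenght ≤ 100 then true
  else if PySem.Str.find text "\r\n" = -1 then false
  else pvALoop text.toList 0

-- ===== PORT B =====
-- str.split('\r') on a list of characters (Python's split with a one-char separator)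
def pvSplitCR : List Char → List (List Char)
  | [] => [[]]
  | c :: cs =>
    match pvSplitCR cs with
    | [] => [[]]   -- unreachable: pvSplitCR never returns []
    | s :: ss => if c = '\r' then [] :: s :: ss else (c :: s) :: ss

def check_text_requirements_alt (text : String) : Bool :=
  if PySem.Str.len text = 0 then false
  else if PySem.Str.len text ≤ 100 then true
  else if PySem.Str.isIn "\r\n" text then
    (pvSplitCR (text.toList.filter (fun c => c ≠ '\n'))).all (fun seg => seg.length ≤ 100)
  else false

-- ===== PRECONDITION & SPEC =====
def Spec_check_text_requirements (text : String) (out : Bool) : Prop := out = check_text_requirements_alt text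
instance (text : String) (out : Bool) : Decidable (Spec_check_text_requirements text out) := by unfold Spec_check_text_requirements; infer_instance

-- ===== CLAIM (what is proved, stated in full; the proofs are below) =====
def Claim_equal_check_text_requirements : Prop := ∀ (text : String), Dom_check_text_requirements text → Spec_check_text_requirements text (check_text_requirements text)

-- ===== LEMMAS AND PROOFS =====

theorem pvSplitCR_ne_nil (cs : List Char) : pvSplitCR cs ≠ [] := by
  induction cs with
  | nil => simp [pvSplitCR]
  | cons c rest ih =>
    simp only [pvSplitCR]
    cases h : pvSplitCR rest with
    | nil => exact absurd h ih
    | cons s ss => split_ifs <;> simp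

-- one-step unfoldings of A's scan and of the split
theorem pvALoop_cr (rest : List Char) (ls : Int) :
    pvALoop ('\r' :: rest) ls = if ls > 100 then false else pvALoop rest 0 := by
  simp [pvALoop]

theorem pvALoop_nl (rest : List Char) (ls : Int) :
    pvALoop ('\n' :: rest) ls = pvALoop rest ls := by
  simp [pvALoop]

theorem pvALoop_other {c : Char} (hcr : c ≠ '\r') (hnl : c ≠ '\n') (rest : List Char)
    (ls : Int) :
    pvALoop (c :: rest) ls = if ls + 1 > 100 then false else pvALoop rest (ls + 1) := by
  simp [pvALoop, hcr, hnl]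

theorem pvSplitCR_cr (cs : List Char) : pvSplitCR ('\r' :: cs) = [] :: pvSplitCR cs := by
  cases h : pvSplitCR cs with
  | nil => exact absurd h (pvSplitCR_ne_nil _)
  | cons s ss => simp [pvSplitCR, h]

theorem pvSplitCR_other {c : Char} (hcr : c ≠ '\r') (cs : List Char) :
    pvSplitCR (c :: cs) = (c :: (pvSplitCR cs).headI) :: (pvSplitCR cs).tail := by
  cases h : pvSplitCR cs with
  | nil => exact absurd h (pvSplitCR_ne_nil _)
  | cons s ss => simp [pvSplitCR, h, hcr]

-- dropping the '\n' characters does not change A's scan (it skips them)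
theorem pvALoop_filter (cs : List Char) : ∀ ls : Int,
    pvALoop (cs.filter (fun c => c ≠ '\n')) ls = pvALoop cs ls := by
  induction cs with
  | nil => intro ls; rfl
  | cons c rest ih =>
    intro ls
    by_cases hnl : c = '\n'
    · subst hnl
      rw [List.filter_cons_of_neg (by simp), ih, pvALoop_nl]
    · rw [List.filter_cons_of_pos (by simp [hnl])]
      by_cases hcr : c = '\r'
      · subst hcr
        rw [pvALoop_cr, pvALoop_cr, ih]
      · rw [pvALoop_other hcr hnl, pvALoop_other hcr hnl, ih]

-- on a '\n'-free string, A's scan with current line length ls (0 ≤ ls ≤ 100) is the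
-- segment-length check on the split, the first segment counted with offset ls
theorem pvALoop_no_nl (cs : List Char) : ∀ ls : Int, 0 ≤ ls → ls ≤ 100 → '\n' ∉ cs →
    pvALoop cs ls =
      (decide (ls + ((pvSplitCR cs).headI).length ≤ 100) &&
        ((pvSplitCR cs).tail).all (fun seg => seg.length ≤ 100)) := by
  induction cs with
  | nil =>
    intro ls h0 h1 _
    simp [pvALoop, pvSplitCR]
    omega
  | cons c rest ih =>
    intro ls h0 h1 hmem
    have hnl : c ≠ '\n' := fun hc => hmem (hc ▸ List.mem_cons_self ..)
    have hrest : '\n' ∉ rest := fun hr => hmem (List.mem_cons_of_mem _ hr)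
    cases h : pvSplitCR rest with
    | nil => exact absurd h (pvSplitCR_ne_nil _)
    | cons s ss =>
      by_cases hcr : c = '\r'
      · subst hcr
        rw [pvALoop_cr, pvSplitCR_cr, h, if_neg (by omega),
          ih 0 (by omega) (by omega) hrest, h]
        simp only [List.headI_cons, List.tail_cons, List.all_cons, List.length_nil,
          Nat.cast_zero, add_zero]
        rw [decide_eq_true h1, Bool.true_and]
        congr 1
        rw [decide_eq_decide]
        push_cast
        omega
      · rw [pvALoop_other hcr hnl, pvSplitCR_other hcr, h]
        simp only [List.headI_cons, List.tail_cons, List.length_cons]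
        by_cases hlim : ls + 1 > 100
        · rw [if_pos hlim]
          have hx : ¬ (ls + ((s.length : Int) + 1) ≤ 100) := by omega
          simp [hx]
        · rw [if_neg hlim, ih (ls + 1) (by omega) (by omega) hrest, h]
          simp only [List.headI_cons, List.tail_cons]
          congr 1
          rw [decide_eq_decide]
          push_cast
          omega

-- ===== VERDICT (by name: the statement is the Claim_ definition above) =====
theorem check_text_requirements_spec : Claim_equal_check_text_requirements := by
  intro text _
  unfold Spec_check_text_requirements
  simp only [check_text_requirements, check_text_requirements_alt]
  by_cases h0 : (PySem.Str.len text : Int) = 0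
  · rw [if_pos h0, if_pos h0]
  · rw [if_neg h0, if_neg h0]
    by_cases h1 : (PySem.Str.len text : Int) ≤ 100
    · rw [if_pos h1, if_pos h1]
    · rw [if_neg h1, if_neg h1]
      have hfind : (PySem.Str.find text "\r\n" = -1) ↔ (PySem.Str.isIn "\r\n" text = false) := by
        rw [PySem.Str.find_eq_neg_one_iff, ← PySem.Str.isIn_iff_infix]
        simp
      by_cases h2 : PySem.Str.find text "\r\n" = -1
      · rw [if_pos h2, if_neg (by simpa using hfind.mp h2)]
      · have hin : PySem.Str.isIn "\r\n" text = true := by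
          cases hb : PySem.Str.isIn "\r\n" text
          · exact absurd (hfind.mpr hb) h2
          · rfl
        rw [if_neg h2, if_pos (by simpa using hin)]
        rw [← pvALoop_filter, pvALoop_no_nl _ 0 (by omega) (by omega) (by simp [List.mem_filter])]
        cases h : pvSplitCR (text.toList.filter (fun c => c ≠ '\n')) with
        | nil => exact absurd h (pvSplitCR_ne_nil _)
        | cons s ss =>
          simp only [List.headI, List.tail_cons, List.all_cons]
          congr 1
          rw [decide_eq_decide]
          omega
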